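-- pv_equiv track=rewrite | github.com/Project-N-E-K-O/N.E.K.O | utils/autostart_service.py | _quote_posix_command
-- ===== SOURCE A (Python) =====
-- _DESKTOP_ENTRY_EXEC_FIELD_CODES = frozenset("fFuUdDnNickvm")
--
-- _DESKTOP_ENTRY_EXEC_RESERVED_CHARS = frozenset((
--     " ",
--     "\t",
--     "\n",
--     '"',
--     "'",
--     "\\",
--     ">",
--     "<",
--     "~",
--     "|",
--     "&",
--     ";",
--     "$",
--     "*",
--     "?",
--     "#",
--     "(",
--     ")",
--     "`",
-- ))
--
-- def _escape_desktop_entry_exec_percent(value: str) -> str: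
--     escaped: list[str] = []
--     index = 0
--
--     while index < len(value):
--         char = value[index]
--         if char != "%":
--             escaped.append(char)
--             index += 1
--             continue
--
--         if index + 1 >= len(value):
--             escaped.append("%%")
--             index += 1
--             continue
--
--         next_char = value[index + 1]
--         if next_char == "%" or next_char in _DESKTOP_ENTRY_EXEC_FIELD_CODES:
--             escaped.append("%" + next_char)
--             index += 2
--             continue
--
--         escaped.append("%%")
--         index += 1
--
--     return "".join(escaped)
--
-- def _quote_desktop_entry_exec_argument(value: str) -> str:
--     escaped: list[str] = []
--
--     for char in value:
--         if char == "\\":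
--             escaped.append("\\\\\\\\")
--         elif char in {'"', "`", "$"}:
--             escaped.append("\\" + char)
--         else:
--             escaped.append(char)
--
--     return '"' + "".join(escaped) + '"'
--
-- def _quote_posix_command(command: list[str]) -> str:
--     quoted: list[str] = []
--
--     for part in command:
--         value = _escape_desktop_entry_exec_percent(str(part))
--         if value == "" or any(char in _DESKTOP_ENTRY_EXEC_RESERVED_CHARS for char in value):
--             quoted.append(_quote_desktop_entry_exec_argument(value))
--         else:
--             quoted.append(value)
--
--     return " ".join(quoted)
-- ===== SOURCE B (Python) =====
-- _DESKTOP_ENTRY_EXEC_FIELD_CODES = frozenset("fFuUdDnNickvm")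
--
-- _DESKTOP_ENTRY_EXEC_RESERVED_CHARS = frozenset((
--     " ", "\t", "\n", '"', "'", "\\", ">", "<", "~", "|", "&", ";",
--     "$", "*", "?", "#", "(", ")", "`",
-- ))
--
--
-- def _escape_desktop_entry_exec_percent(value):
--     # single forward pass with a 'pending percent' state flag instead of an
--     # index-jumping while loop
--     out = []
--     pending = False
--     for ch in value:
--         if pending:
--             pending = False
--             if ch == "%" or ch in _DESKTOP_ENTRY_EXEC_FIELD_CODES:
--                 out.append("%" + ch)
--                 continue
--             out.append("%%")
--         if ch == "%":
--             pending = True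
--         else:
--             out.append(ch)
--     if pending:
--         out.append("%%")
--     return "".join(out)
--
--
-- def _quote_desktop_entry_exec_argument(value):
--     # ordered replace chain; backslash must come first
--     return '"' + (value.replace("\\", "\\\\\\\\")
--                        .replace('"', '\\"')
--                        .replace("`", "\\`")
--                        .replace("$", "\\$")) + '"'
--
--
-- def _render_part(part):
--     value = _escape_desktop_entry_exec_percent(str(part))
--     if not value or any(c in _DESKTOP_ENTRY_EXEC_RESERVED_CHARS for c in value):
--         return _quote_desktop_entry_exec_argument(value)
--     return value
--
--
-- def _quote_posix_command(command):
--     return " ".join(map(_render_part, command))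
-- ===== Notes on version B (the rewrite author's own statement) =====
-- stated objective: idiomatic
-- what changed: Percent-escaping becomes a single forward pass carrying a pending-percent state flag instead of an index-jumping while loop, argument quoting becomes an ordered str.replace chain (backslash first) instead of a per-character scanner, and the outer accumulator loop becomes ' '.join(map(render, command)).
import Mathlib
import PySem

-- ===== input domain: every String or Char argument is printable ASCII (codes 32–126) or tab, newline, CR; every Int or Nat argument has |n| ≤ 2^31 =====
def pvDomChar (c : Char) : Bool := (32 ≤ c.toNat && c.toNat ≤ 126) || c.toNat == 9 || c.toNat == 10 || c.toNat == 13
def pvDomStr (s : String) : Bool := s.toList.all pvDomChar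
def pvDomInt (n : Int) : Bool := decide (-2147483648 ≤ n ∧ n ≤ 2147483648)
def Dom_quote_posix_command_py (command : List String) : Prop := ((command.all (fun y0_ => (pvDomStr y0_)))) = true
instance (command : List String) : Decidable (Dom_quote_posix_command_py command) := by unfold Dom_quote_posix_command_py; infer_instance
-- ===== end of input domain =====

-- B replaces A's index-jumping percent scanner by a one-pass state machine (pending flag),
-- A's per-character quote scanner by an ordered str.replace chain, and A's accumulator
-- loop by map+join; objective: idiomatic, same outputs.

-- ===== PORT A =====

-- frozenset "fFuUdDnNickvm" (membership-only constant)
def pvFieldCodes : PySem.Set Char :=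
  PySem.Set.ofList ['f','F','u','U','d','D','n','N','i','c','k','v','m']

-- frozenset of reserved chars (membership-only constant)
def pvReserved : PySem.Set Char :=
  PySem.Set.ofList [' ','\t','\n','"','\'','\\','>','<','~','|','&',';','$','*','?','#','(',')','`']

-- _escape_desktop_entry_exec_percent: while-loop over the index, consuming 1 or 2 chars
def escPercentA : List Char → List Char
  | [] => []
  | c :: rest =>
    if c ≠ '%' then c :: escPercentA rest
    else
      match rest with
      | [] => ['%', '%']                       -- index + 1 >= len(value)
      | d :: rest' =>
        if d = '%' ∨ PySem.Set.contains pvFieldCodes d then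
          '%' :: d :: escPercentA rest'        -- consume two chars
        else
          '%' :: '%' :: escPercentA (d :: rest')  -- consume only the '%'

-- _quote_desktop_entry_exec_argument: per-character scan, appended pieces joined
def quoteArgA (value : List Char) : List Char :=
  '"' :: (value.flatMap (fun c =>
    if c = '\\' then ['\\','\\','\\','\\']
    else if c = '"' ∨ c = '`' ∨ c = '$' then ['\\', c]
    else [c])) ++ ['"']

-- _quote_posix_command: loop appending quoted parts, then " ".join
def quote_posix_command_py (command : List String) : String :=
  let quoted := command.foldl (fun acc part =>
    let value := escPercentA part.toList
    if value = [] ∨ value.any (fun c => PySem.Set.contains pvReserved c) then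
      acc ++ [quoteArgA value]
    else
      acc ++ [value]) []
  String.ofList (PySem.Chars.join [' '] quoted)

-- ===== PORT B =====

-- one forward pass carrying (output-so-far, pending-percent flag), finalized at the end
def escPercentBStep : List Char × Bool → Char → List Char × Bool
  | (acc, true), ch =>
    if ch = '%' ∨ PySem.Set.contains pvFieldCodes ch then
      (acc ++ ['%', ch], false)
    else if ch = '%' then
      (acc ++ ['%', '%'], true)
    else
      (acc ++ ['%', '%', ch], false)
  | (acc, false), ch =>
    if ch = '%' then (acc, true) else (acc ++ [ch], false)

-- finalize: a pending '%' at the end of the string becomes '%%'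
def escFin (st : List Char × Bool) : List Char :=
  if st.2 then st.1 ++ ['%', '%'] else st.1

def escPercentB (value : List Char) : List Char :=
  escFin (value.foldl escPercentBStep ([], false))

-- '"' + value.replace('\\','\\\\\\\\').replace('"','\\"').replace('`','\\`').replace('$','\\$') + '"'
def quoteArgB (value : List Char) : List Char :=
  '"' :: (PySem.Chars.replace
            (PySem.Chars.replace
              (PySem.Chars.replace
                (PySem.Chars.replace value ['\\'] ['\\','\\','\\','\\'])
                ['"'] ['\\','"'])
              ['`'] ['\\','`'])
            ['$'] ['\\','$']) ++ ['"']

-- render one argument (B's helper), then " ".join(map(render, command))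
def renderPartB (part : String) : List Char :=
  let value := escPercentB part.toList
  if value = [] ∨ value.any (fun c => PySem.Set.contains pvReserved c) then
    quoteArgB value
  else
    value

def quote_posix_command_py_alt (command : List String) : String :=
  String.ofList (PySem.Chars.join [' '] (command.map renderPartB))

-- ===== PRECONDITION & SPEC =====
def Spec_quote_posix_command_py (command : List String) (out : String) : Prop := out = quote_posix_command_py_alt command
instance (command : List String) (out : String) : Decidable (Spec_quote_posix_command_py command out) := by unfold Spec_quote_posix_command_py; infer_instance

-- ===== CLAIM (what is proved, stated in full; the proofs are below) =====
def Claim_equal_quote_posix_command_py : Prop := ∀ (command : List String), Dom_quote_posix_command_py command → Spec_quote_posix_command_py command (quote_posix_command_py command)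

-- ===== LEMMAS AND PROOFS =====

-- unfolding equations for A's scanner (used when replaying the state machine)
theorem escA_ne (c : Char) (rest : List Char) (h : c ≠ '%') :
    escPercentA (c :: rest) = c :: escPercentA rest := by
  rw [escPercentA.eq_def]; simp [h]

theorem escA_code (d : Char) (rest : List Char)
    (h : d = '%' ∨ PySem.Set.contains pvFieldCodes d) :
    escPercentA ('%' :: d :: rest) = '%' :: d :: escPercentA rest := by
  have h' : d = '%' ∨ d ∈ pvFieldCodes := by
    rcases h with hx | hx
    · exact Or.inl hx
    · exact Or.inr ((PySem.Set.contains_iff _ _).mp hx)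
  rw [escPercentA.eq_def]; simp [h']

theorem escA_nocode (d : Char) (rest : List Char)
    (h : ¬(d = '%' ∨ PySem.Set.contains pvFieldCodes d)) :
    escPercentA ('%' :: d :: rest) = '%' :: '%' :: escPercentA (d :: rest) := by
  rw [escPercentA.eq_def]
  have h1 : d ≠ '%' := fun hx => h (Or.inl hx)
  have h2 : d ∉ pvFieldCodes := fun hx =>
    h (Or.inr ((PySem.Set.contains_iff _ _).mpr hx))
  simp [h1, h2]

-- the state machine's fold, started with pending = false resp. true, produces A's scan
theorem escPercentB_fold (cs : List Char) : ∀ acc : List Char,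
    escFin (cs.foldl escPercentBStep (acc, false)) = acc ++ escPercentA cs
  ∧ escFin (cs.foldl escPercentBStep (acc, true)) = acc ++ escPercentA ('%' :: cs) := by
  induction cs with
  | nil => intro acc; constructor <;> simp [escFin, escPercentA]
  | cons ch rest ih =>
    intro acc
    constructor
    · by_cases h : ch = '%'
      · subst h
        simpa only [List.foldl_cons, escPercentBStep, if_pos rfl] using (ih acc).2
      · simp only [List.foldl_cons, escPercentBStep, if_neg h]
        rw [(ih (acc ++ [ch])).1, escA_ne ch rest h]
        simp
    · by_cases hc : ch = '%' ∨ PySem.Set.contains pvFieldCodes ch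
      · simp only [List.foldl_cons, escPercentBStep, if_pos hc]
        rw [(ih (acc ++ ['%', ch])).1, escA_code ch rest hc]
        simp
      · have h2 : ch ≠ '%' := fun hx => hc (Or.inl hx)
        simp only [List.foldl_cons, escPercentBStep, if_neg hc, if_neg h2]
        rw [(ih (acc ++ ['%', '%', ch])).1, escA_nocode ch rest hc, escA_ne ch rest h2]
        simp

-- the two percent-escapers agree
theorem escPercent_eq (cs : List Char) : escPercentB cs = escPercentA cs := by
  simpa [escPercentB] using (escPercentB_fold cs []).1

-- str.replace with a single-char needle is a per-character flatMap (inner worker)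
theorem replace_go_single (a : Char) (new : List Char) (l acc : List Char) :
    PySem.Chars.replace.go [a] new l.length l acc
      = acc.reverse ++ l.flatMap (fun c => if c = a then new else [c]) := by
  induction l generalizing acc with
  | nil => simp [PySem.Chars.replace.go]
  | cons c cs ih =>
    by_cases h : c = a
    · subst h
      simp only [List.length_cons, PySem.Chars.replace.go, List.isPrefixOf, BEq.rfl,
        Bool.true_and, if_pos]
      simp only [List.length_nil, List.drop_succ_cons, List.drop_zero]
      rw [ih]
      simp
    · have : ¬ ([a].isPrefixOf (c :: cs) = true) := by
        simp [List.isPrefixOf]; intro hx; exact absurd hx.symm h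
      simp only [List.length_cons, PySem.Chars.replace.go, if_neg this]
      rw [ih]
      simp [h]

-- str.replace with a single-char needle is a per-character flatMap
theorem replace_single (a : Char) (new : List Char) (l : List Char) :
    PySem.Chars.replace l [a] new = l.flatMap (fun c => if c = a then new else [c]) := by
  simpa using replace_go_single a new l []

-- the composition of B's four replaces equals A's per-character escaping
theorem quoteArg_eq (value : List Char) : quoteArgB value = quoteArgA value := by
  unfold quoteArgA quoteArgB
  rw [replace_single, replace_single, replace_single, replace_single,
     List.flatMap_assoc, List.flatMap_assoc, List.flatMap_assoc]
  congr 2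
  apply List.flatMap_congr
  intro c _
  by_cases h1 : c = '\\'
  · subst h1; decide
  by_cases h2 : c = '"'
  · subst h2; decide
  by_cases h3 : c = '`'
  · subst h3; decide
  by_cases h4 : c = '$'
  · subst h4; decide
  simp [h1, h2, h3, h4]

-- A's append-accumulator loop builds exactly the map of B's renderer
theorem foldl_eq_map (command : List String) : ∀ acc : List (List Char),
    command.foldl (fun acc part =>
      let value := escPercentA part.toList
      if value = [] ∨ value.any (fun c => PySem.Set.contains pvReserved c) then
        acc ++ [quoteArgA value]
      else
        acc ++ [value]) acc = acc ++ command.map renderPartB := by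
  induction command with
  | nil => simp
  | cons p ps ih =>
    intro acc
    simp only [List.foldl_cons, List.map_cons]
    have hv : renderPartB p =
        (let value := escPercentA p.toList
         if value = [] ∨ value.any (fun c => PySem.Set.contains pvReserved c) then
           quoteArgA value else value) := by
      simp [renderPartB, escPercent_eq, quoteArg_eq]
    by_cases h : escPercentA p.toList = [] ∨
        (escPercentA p.toList).any (fun c => PySem.Set.contains pvReserved c)
    · simp only [if_pos h] at hv ⊢
      rw [ih, hv]; simp
    · simp only [if_neg h] at hv ⊢
      rw [ih, hv]; simp

-- ===== VERDICT (by name: the statement is the Claim_ definition above) =====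
theorem quote_posix_command_py_spec : Claim_equal_quote_posix_command_py := by
  intro command _
  unfold Spec_quote_posix_command_py quote_posix_command_py quote_posix_command_py_alt
  rw [foldl_eq_map command []]
  simp
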